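-- pv_equiv track=rewrite | github.com/kwangheeya/Participation-based-Betweenness-Centrality | py/src/common.py | find_entity_name
-- ===== SOURCE A (Python) =====
-- def find_entity_name(global_entity2id, local_entity2id, value):
--     intermediate_value = None
--     final_key = ''
--     for key in local_entity2id:
--         if local_entity2id[key] == value:
--             intermediate_value = key
--             break;
--     for key in global_entity2id:
--         if global_entity2id[key] == intermediate_value:
--             final_key = key
--             break
--     return final_key
-- ===== SOURCE B (Python) =====
-- def find_entity_name(global_entity2id, local_entity2id, value):
--     rev_local = {}
--     for key in local_entity2id:
--         v = local_entity2id[key]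
--         if v not in rev_local:
--             rev_local[v] = key
--     rev_global = {}
--     for key in global_entity2id:
--         v = global_entity2id[key]
--         if v not in rev_global:
--             rev_global[v] = key
--     intermediate_value = rev_local.get(value)
--     if intermediate_value is None:
--         return ''
--     return rev_global.get(intermediate_value, '')
-- ===== Notes on version B (the rewrite author's own statement) =====
-- stated objective: alternative
-- what changed: Replaces the two break-on-first-match scans by building two first-seen reverse-lookup dicts (value -> key) and doing two constant-time lookups with the same None/'' defaults.
import Mathlib
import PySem

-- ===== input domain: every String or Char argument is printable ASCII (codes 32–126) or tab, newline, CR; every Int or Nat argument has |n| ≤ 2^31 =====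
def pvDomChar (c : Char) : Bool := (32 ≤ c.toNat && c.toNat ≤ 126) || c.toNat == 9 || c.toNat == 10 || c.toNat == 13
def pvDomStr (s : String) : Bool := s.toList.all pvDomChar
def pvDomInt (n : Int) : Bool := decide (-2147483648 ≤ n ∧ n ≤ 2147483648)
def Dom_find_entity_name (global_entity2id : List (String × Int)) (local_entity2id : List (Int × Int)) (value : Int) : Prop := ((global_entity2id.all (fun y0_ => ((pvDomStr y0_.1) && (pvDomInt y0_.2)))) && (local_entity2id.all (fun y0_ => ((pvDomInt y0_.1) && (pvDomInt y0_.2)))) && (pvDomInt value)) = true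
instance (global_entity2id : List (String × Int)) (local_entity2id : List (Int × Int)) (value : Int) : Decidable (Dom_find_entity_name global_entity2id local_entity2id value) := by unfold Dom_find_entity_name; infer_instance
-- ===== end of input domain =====

-- B replaces A's two break-on-first-match scans with two first-seen reverse-lookup
-- dicts built once and then queried; same return value, alternative structure.

-- ===== PORT A =====
-- first loop of A: first key of local_entity2id whose value equals `value` (None if no match)
def pvScanLocal (local_entity2id : List (Int × Int)) (value : Int) : Option Int :=
  match local_entity2id with
  | [] => none
  | (k, v) :: rest => if v = value then some k else pvScanLocal rest value

-- second loop of A: first key of global_entity2id whose value equals intermediate_value ('' if no match;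
-- an Int value never equals Python's None, so iv = none yields '')
def pvScanGlobal (global_entity2id : List (String × Int)) (iv : Option Int) : String :=
  match global_entity2id with
  | [] => ""
  | (k, v) :: rest => if some v = iv then k else pvScanGlobal rest iv

def find_entity_name (global_entity2id : List (String × Int)) (local_entity2id : List (Int × Int)) (value : Int) : String :=
  pvScanGlobal global_entity2id (pvScanLocal local_entity2id value)

-- ===== PORT B =====
-- first-seen reverse dict: maps stored value -> key, keeping the first key for duplicate values
def pvRev {β : Type} (l : List (β × Int)) : PySem.Dict Int β :=
  l.foldl (fun d p => if d.contains p.2 then d else d.insert p.2 p.1) PySem.Dict.empty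

def find_entity_name_alt (global_entity2id : List (String × Int)) (local_entity2id : List (Int × Int)) (value : Int) : String :=
  match (pvRev local_entity2id).get? value with
  | none => ""
  | some iv => (pvRev global_entity2id).getD iv ""

-- ===== PRECONDITION & SPEC =====
def Spec_find_entity_name (global_entity2id : List (String × Int)) (local_entity2id : List (Int × Int)) (value : Int) (out : String) : Prop := out = find_entity_name_alt global_entity2id local_entity2id value
instance (global_entity2id : List (String × Int)) (local_entity2id : List (Int × Int)) (value : Int) (out : String) : Decidable (Spec_find_entity_name global_entity2id local_entity2id value out) := by unfold Spec_find_entity_name; infer_instance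

-- ===== CLAIM (what is proved, stated in full; the proofs are below) =====
def Claim_equal_find_entity_name : Prop := ∀ (global_entity2id : List (String × Int)) (local_entity2id : List (Int × Int)) (value : Int), Dom_find_entity_name global_entity2id local_entity2id value → Spec_find_entity_name global_entity2id local_entity2id value (find_entity_name global_entity2id local_entity2id value)

-- ===== LEMMAS AND PROOFS =====

-- first-match scan on the values of an association list (what A's break loop computes)
def pvFirstMatch {β : Type} (l : List (β × Int)) (x : Int) : Option β :=
  match l with
  | [] => none
  | (k, v) :: rest => if v = x then some k else pvFirstMatch rest x

-- the first-seen reverse-dict fold, looked up, is the first-match scan (generalised over the accumulator)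
theorem pvRev_fold_get {β : Type} (l : List (β × Int)) (d : PySem.Dict Int β) (x : Int) :
    (l.foldl (fun d p => if d.contains p.2 then d else d.insert p.2 p.1) d).get? x
      = ((d.get? x).orElse (fun _ => pvFirstMatch l x)) := by
  induction l generalizing d with
  | nil =>
    cases h : d.get? x <;> simp [pvFirstMatch, Option.orElse, h]
  | cons p rest ih =>
    obtain ⟨k, v⟩ := p
    simp only [List.foldl_cons]
    by_cases hvx : v = x
    · rw [hvx]
      by_cases hc : d.contains x = true
      · rw [if_pos hc, ih]
        have hs : (d.get? x).isSome := by
          rw [← PySem.Dict.contains_eq_isSome_get?]; exact hc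
        obtain ⟨w, hw⟩ := Option.isSome_iff_exists.mp hs
        simp [pvFirstMatch, hw, Option.orElse]
      · rw [if_neg hc, ih]
        have hdx : d.get? x = none := by
          cases h : d.get? x with
          | none => rfl
          | some w => exact absurd (by rw [PySem.Dict.contains_eq_isSome_get?, h]; rfl) hc
        simp [pvFirstMatch, PySem.Dict.get?_insert_self, hdx, Option.orElse]
    · by_cases hc : d.contains v = true
      · rw [if_pos hc, ih]
        simp [pvFirstMatch, hvx]
      · have hne : x ≠ v := fun h => hvx h.symm
        rw [if_neg hc, ih, PySem.Dict.get?_insert, if_neg hne]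
        simp [pvFirstMatch, hvx]

theorem pvRev_get {β : Type} (l : List (β × Int)) (x : Int) :
    (pvRev l).get? x = pvFirstMatch l x := by
  unfold pvRev
  rw [pvRev_fold_get]
  simp [Option.orElse]

-- pvScanLocal is the first-match scan
theorem pvScanLocal_eq (l : List (Int × Int)) (x : Int) :
    pvScanLocal l x = pvFirstMatch l x := by
  induction l with
  | nil => rfl
  | cons p rest ih => obtain ⟨k, v⟩ := p; simp [pvScanLocal, pvFirstMatch, ih]

-- pvScanGlobal with a `some` intermediate is the first-match scan, defaulted to ""
theorem pvScanGlobal_some (g : List (String × Int)) (iv : Int) :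
    pvScanGlobal g (some iv) = (pvFirstMatch g iv).getD "" := by
  induction g with
  | nil => rfl
  | cons p rest ih =>
    obtain ⟨k, v⟩ := p
    by_cases h : v = iv
    · subst h; simp [pvScanGlobal, pvFirstMatch]
    · simp [pvScanGlobal, pvFirstMatch, h, ih]

-- pvScanGlobal with None intermediate is always ""
theorem pvScanGlobal_none (g : List (String × Int)) :
    pvScanGlobal g none = "" := by
  induction g with
  | nil => rfl
  | cons p rest ih => obtain ⟨k, v⟩ := p; simpa [pvScanGlobal] using ih

-- ===== VERDICT (by name: the statement is the Claim_ definition above) =====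
theorem find_entity_name_spec : Claim_equal_find_entity_name := by
  intro g l value _
  unfold Spec_find_entity_name find_entity_name find_entity_name_alt
  rw [pvRev_get, ← pvScanLocal_eq]
  cases h : pvScanLocal l value with
  | none => exact pvScanGlobal_none g
  | some iv =>
    rw [pvScanGlobal_some]
    simp only [PySem.Dict.getD_eq_get?_getD, pvRev_get]
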